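-- pv_equiv track=rewrite | github.com/ciskooo87/Ironclaw | src/ironcore/incremental.py | filter_rows_incremental
-- ===== SOURCE A (Python) =====
-- from typing import Any, Dict, List
--
-- def filter_rows_incremental(rows: List[Dict[str, Any]], mode: str, checkpoint: Dict[str, Any]) -> List[Dict[str, Any]]:
--     if mode == "full":
--         return rows
--
--     if mode == "daily":
--         # Daily mode: keep rows from latest periodo found in current batch
--         periodos = sorted({str(r.get("periodo", "")) for r in rows if str(r.get("periodo", "")).strip() != ""})
--         if not periodos:
--             return rows
--         latest = periodos[-1]
--         return [r for r in rows if str(r.get("periodo", "")) == latest]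
--
--     # since_last (default incremental)
--     last = checkpoint.get("last_periodo_processed")
--     if not last:
--         return rows
--     return [r for r in rows if str(r.get("periodo", "")) > str(last)]
-- ===== SOURCE B (Python) =====
-- from typing import Any, Dict, List
--
-- def filter_rows_incremental(rows: List[Dict[str, Any]], mode: str, checkpoint: Dict[str, Any]) -> List[Dict[str, Any]]:
--     if mode == "daily":
--         # One grouping pass: bucket rows by non-empty periodo; no sort, no second scan.
--         groups: Dict[str, List[Dict[str, Any]]] = {}
--         for r in rows:
--             p = str(r.get("periodo", ""))
--             if p.strip():
--                 groups.setdefault(p, []).append(r)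
--         return groups[max(groups)] if groups else rows
--     if mode != "full":
--         # since_last (default incremental)
--         last = checkpoint.get("last_periodo_processed")
--         if last:
--             out: List[Dict[str, Any]] = []
--             for r in rows:
--                 if str(r.get("periodo", "")) > str(last):
--                     out.append(r)
--             return out
--     return rows
-- ===== Notes on version B (the rewrite author's own statement) =====
-- stated objective: alternative
-- what changed: The daily branch no longer collects distinct periodos, sorts them and re-scans all rows: B makes one grouping pass bucketing rows by non-empty periodo into a dict and returns the bucket of the max key, so the sort and the second full scan disappear; the whole function is also re-decomposed as daily-first with a fall-through default and an explicit accumulator loop for since_last.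
import Mathlib
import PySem

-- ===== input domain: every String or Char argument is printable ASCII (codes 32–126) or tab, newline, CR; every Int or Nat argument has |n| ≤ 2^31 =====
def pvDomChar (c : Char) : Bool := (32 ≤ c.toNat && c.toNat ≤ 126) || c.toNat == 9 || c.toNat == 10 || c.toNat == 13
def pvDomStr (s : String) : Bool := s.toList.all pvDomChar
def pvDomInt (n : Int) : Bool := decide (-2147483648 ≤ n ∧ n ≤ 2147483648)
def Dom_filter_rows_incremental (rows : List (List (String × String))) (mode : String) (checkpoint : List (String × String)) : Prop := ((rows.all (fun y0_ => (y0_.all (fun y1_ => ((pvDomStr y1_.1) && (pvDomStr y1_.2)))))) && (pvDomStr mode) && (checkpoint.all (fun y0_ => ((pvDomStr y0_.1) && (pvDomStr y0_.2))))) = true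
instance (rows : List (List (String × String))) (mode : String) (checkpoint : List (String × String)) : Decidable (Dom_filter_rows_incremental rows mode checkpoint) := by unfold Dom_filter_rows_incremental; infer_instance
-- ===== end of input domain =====

-- B re-decomposes the function (daily first, fall-through default) and replaces A's daily
-- branch (sort the distinct periodos, then re-scan all rows) by one grouping pass into a
-- dict bucketed by periodo, returning the bucket of the max key; the since_last filter is
-- an explicit accumulator loop (objective: alternative — sort and second scan disappear).

-- ===== PORT A =====
-- str(r.get("periodo", "")) — row values are strings on Dom, so str() is the identity
def pvPeriodo (r : List (String × String)) : String :=
  PySem.Dict.getD (PySem.Dict.mk r) "periodo" ""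

def filter_rows_incremental (rows : List (List (String × String))) (mode : String) (checkpoint : List (String × String)) : List (List (String × String)) :=
  if mode = "full" then rows
  else if mode = "daily" then
    let periodos := PySem.List.sorted
      (PySem.Set.ofList ((rows.filter (fun r => PySem.Str.strip (pvPeriodo r) ≠ "")).map pvPeriodo))
      (fun x => x) false
    match periodos.getLast? with          -- 'if not periodos: return rows' + 'latest = periodos[-1]'
    | none => rows
    | some latest => rows.filter (fun r => pvPeriodo r = latest)
  else
    match PySem.Dict.get? (PySem.Dict.mk checkpoint) "last_periodo_processed" with
    | none => rows                        -- 'if not last' — None is falsy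
    | some last =>
      if last = "" then rows              -- '' is falsy too
      else rows.filter (fun r => last < pvPeriodo r)

-- ===== PORT B =====
-- Source B's daily loop: groups.setdefault(p, []).append(r) for each row with non-blank periodo
def bGroups (rows : List (List (String × String))) : PySem.Dict String (List (List (String × String))) :=
  rows.foldl (fun d r =>
      let p := PySem.Dict.getD (PySem.Dict.mk r) "periodo" ""
      if PySem.Str.strip p ≠ "" then PySem.Dict.modify d p [] (· ++ [r]) else d)
    PySem.Dict.empty

-- Source B's since_last loop: out = []; for r in rows: if periodo > last: out.append(r)
def bSince (last : String) (rows : List (List (String × String))) : List (List (String × String)) :=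
  rows.foldl (fun out r =>
      if last < PySem.Dict.getD (PySem.Dict.mk r) "periodo" "" then out ++ [r] else out) []

def filter_rows_incremental_alt (rows : List (List (String × String))) (mode : String) (checkpoint : List (String × String)) : List (List (String × String)) :=
  if mode = "daily" then
    let groups := bGroups rows
    match PySem.List.max? groups.keys (fun k => k) with   -- 'if groups: return groups[max(groups)]'
    | some m => PySem.Dict.getD groups m []
    | none => rows
  else if mode ≠ "full" then
    match PySem.Dict.get? (PySem.Dict.mk checkpoint) "last_periodo_processed" with
    | some last => if last ≠ "" then bSince last rows else rows   -- 'if last:' — '' falsy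
    | none => rows
  else rows

-- ===== PRECONDITION & SPEC =====
def Spec_filter_rows_incremental (rows : List (List (String × String))) (mode : String) (checkpoint : List (String × String)) (out : List (List (String × String))) : Prop := out = filter_rows_incremental_alt rows mode checkpoint
instance (rows : List (List (String × String))) (mode : String) (checkpoint : List (String × String)) (out : List (List (String × String))) : Decidable (Spec_filter_rows_incremental rows mode checkpoint out) := by unfold Spec_filter_rows_incremental; infer_instance

-- ===== CLAIM (what is proved, stated in full; the proofs are below) =====
def Claim_equal_filter_rows_incremental : Prop := ∀ (rows : List (List (String × String))) (mode : String) (checkpoint : List (String × String)), Dom_filter_rows_incremental rows mode checkpoint → Spec_filter_rows_incremental rows mode checkpoint (filter_rows_incremental rows mode checkpoint)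

-- ===== LEMMAS AND PROOFS =====

-- the grouping loop, restricted to the kept rows
theorem groups_eq (rows : List (List (String × String))) :
    bGroups rows =
    ((rows.filter (fun r => PySem.Str.strip (pvPeriodo r) ≠ "")).map (fun r => (pvPeriodo r, r))).foldl
      (fun d p => PySem.Dict.modify d p.1 [] (· ++ [p.2])) PySem.Dict.empty := by
  unfold bGroups
  rw [List.foldl_map, List.foldl_filter]
  simp [pvPeriodo]

theorem sorted_getLast_eq_max {xs : List String} {m : String}
    (h : PySem.List.max? xs (fun k => k) = some m) :
    (PySem.List.sorted xs (fun x => x) false).getLast? = some m := by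
  have hperm := PySem.List.sorted_perm xs (fun x => x) false
  have hpw := PySem.List.sorted_pairwise xs (fun x => x)
  have hmem : m ∈ xs := PySem.List.max?_mem h
  have hmax : ∀ y ∈ xs, y ≤ m := PySem.List.max?_isMax h
  cases hs : PySem.List.sorted xs (fun x => x) false with
  | nil =>
    exfalso
    have := hperm.symm.mem_iff.mp hmem
    simp [hs] at this
  | cons a t =>
    rw [List.getLast?_eq_some_iff]
    have hlast : (a :: t).getLast (by simp) ∈ a :: t := List.getLast_mem _
    refine ⟨(a :: t).dropLast, ?_⟩
    have hmt : m ∈ a :: t := by rw [hs] at hperm; exact hperm.mem_iff.mpr hmem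
    have hge : ∀ y ∈ a :: t, y ≤ (a :: t).getLast (by simp) := by
      intro y hy
      rw [hs] at hpw
      rcases List.mem_iff_getElem.mp hy with ⟨i, hi, rfl⟩
      have hl : (a :: t).getLast (by simp) = (a :: t)[(a::t).length - 1] := by
        rw [List.getLast_eq_getElem]
      rw [hl]
      rcases Nat.lt_or_ge i ((a::t).length - 1) with hlt | hge'
      · exact List.pairwise_iff_getElem.mp hpw i _ (by omega) (by omega) hlt
      · have : i = (a::t).length - 1 := by omega
        subst this; exact le_refl _
    have h1 : (a :: t).getLast (by simp) ≤ m := hmax _ (by rw [hs] at hperm; exact hperm.mem_iff.mp hlast)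
    have h2 : m ≤ (a :: t).getLast (by simp) := hge m hmt
    have : (a :: t).getLast (by simp) = m := le_antisymm h1 h2
    rw [← this]
    exact (List.dropLast_concat_getLast (by simp)).symm

theorem daily_eq (rows : List (List (String × String))) :
    (match (PySem.List.sorted
      (PySem.Set.ofList ((rows.filter (fun r => PySem.Str.strip (pvPeriodo r) ≠ "")).map pvPeriodo))
      (fun x => x) false).getLast? with
     | none => rows
     | some latest => rows.filter (fun r => pvPeriodo r = latest)) =
    (match PySem.List.max? (bGroups rows).keys (fun k => k) with
     | some m => PySem.Dict.getD (bGroups rows) m []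
     | none => rows) := by
  rw [groups_eq]
  set l := rows.filter (fun r => PySem.Str.strip (pvPeriodo r) ≠ "") with hl
  have hkeys : ((l.map (fun r => (pvPeriodo r, r))).foldl
      (fun d p => PySem.Dict.modify d p.1 [] (· ++ [p.2])) PySem.Dict.empty).keys
      = PySem.Set.ofList (l.map pvPeriodo) := by
    rw [List.foldl_map]
    rw [PySem.Dict.keys_foldl_modify_key (key := pvPeriodo) (d0 := []) (f := fun _ r => (· ++ [r]))]
    simp only [PySem.Dict.keys_empty]
    exact PySem.Set.update_empty _
  rw [hkeys]
  cases hmax : PySem.List.max? (PySem.Set.ofList (l.map pvPeriodo)) (fun k => k) with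
  | none =>
    have : PySem.Set.ofList (l.map pvPeriodo) = [] := (PySem.List.max?_eq_none_iff _ _).mp hmax
    have hnil : PySem.List.sorted (PySem.Set.ofList (l.map pvPeriodo)) (fun x => x) false = [] := by
      rw [this]; rfl
    rw [hnil]
    rfl
  | some m =>
    rw [sorted_getLast_eq_max hmax]
    have hbucket : PySem.Dict.getD ((l.map (fun r => (pvPeriodo r, r))).foldl
        (fun d p => PySem.Dict.modify d p.1 [] (· ++ [p.2])) PySem.Dict.empty) m []
        = l.filter (fun r => pvPeriodo r = m) := by
      rw [PySem.Dict.getD_foldl_modify_append]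
      rw [List.filter_map]
      simp only [Function.comp_def, List.map_map, PySem.Dict.getD_empty, List.nil_append]
      rw [List.map_id_fun']
      apply List.filter_congr
      intro r _
      by_cases h : pvPeriodo r = m
      · simp [h]
      · simp [h]
    show rows.filter (fun r => decide (pvPeriodo r = m)) =
      PySem.Dict.getD ((l.map (fun r => (pvPeriodo r, r))).foldl
        (fun d p => PySem.Dict.modify d p.1 [] (· ++ [p.2])) PySem.Dict.empty) m []
    rw [hbucket]
    have hm : m ∈ l.map pvPeriodo := by
      have := PySem.List.max?_mem hmax
      exact (PySem.Set.mem_ofList _ _).mp this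
    have hmstrip : PySem.Str.strip m ≠ "" := by
      rcases List.mem_map.mp hm with ⟨r, hr, rfl⟩
      rw [hl] at hr
      exact of_decide_eq_true ((List.mem_filter.mp hr).2)
    rw [hl]
    rw [List.filter_filter]
    apply List.filter_congr
    intro r _
    by_cases h : pvPeriodo r = m
    · simp [h, hmstrip]
    · simp [h]

-- the accumulator loop of Source B's since_last branch is A's filter
theorem since_eq (last : String) (rows : List (List (String × String))) :
    rows.filter (fun r => last < pvPeriodo r) = bSince last rows := by
  unfold bSince
  rw [PySem.List.foldl_append_ite_eq_filter]
  simp [pvPeriodo]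

-- ===== VERDICT (by name: the statement is the Claim_ definition above) =====
theorem filter_rows_incremental_spec : Claim_equal_filter_rows_incremental := by
  intro rows mode checkpoint _
  unfold Spec_filter_rows_incremental filter_rows_incremental filter_rows_incremental_alt
  by_cases hd : mode = "daily"
  · have hf : mode ≠ "full" := by rw [hd]; decide
    rw [if_neg hf, if_pos hd, if_pos hd]
    exact daily_eq rows
  · by_cases hf : mode = "full"
    · rw [if_pos hf, if_neg hd, if_neg (by simp [hf] : ¬ mode ≠ "full")]
    · rw [if_neg hf, if_neg hd, if_neg hd, if_pos (hf : mode ≠ "full")]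
      cases PySem.Dict.get? (PySem.Dict.mk checkpoint) "last_periodo_processed" with
      | none => rfl
      | some last =>
        by_cases he : last = ""
        · simp [he]
        · simp only [ne_eq, he, not_false_iff, if_true]
          exact since_eq last rows
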